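-- pv_equiv track=rewrite | github.com/janezaletskaya/algorithms | algorithm_training_2025/week2/A.py | make_segment_tree
-- ===== SOURCE A (Python) =====
-- def make_segment_tree(array: list[int]) -> list[tuple[int, int]]:
--     n = 1
--     while n < len(array):
--         n *= 2
--
--     array = array + [-1] * (n - len(array))
--     segment_tree = [(-1, 0)] * (2 * n - 1)
--     for j in range(n):
--         segment_tree[n - 1 + j] = (array[j], 1)
--
--     for k in range(n - 2, -1, -1):
--         left_val, left_cnt = segment_tree[2 * k + 1]
--         right_val, right_cnt = segment_tree[2 * k + 2]
--
--         if left_val == right_val: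
--             segment_tree[k] = (left_val, left_cnt + right_cnt)
--         elif left_val > right_val:
--             segment_tree[k] = (left_val, left_cnt)
--         else:
--             segment_tree[k] = (right_val, right_cnt)
--
--     return segment_tree
-- ===== SOURCE B (Python) =====
-- def _maxcount(seg):
--     m = max(seg)
--     return (m, seg.count(m))
--
--
-- def make_segment_tree(array: list[int]) -> list[tuple[int, int]]:
--     n = 1
--     while n < len(array):
--         n *= 2
--
--     arr = array + [-1] * (n - len(array))
--     tree = []
--     for k in range(2 * n - 1):
--         d = (k + 1).bit_length() - 1      # depth of heap node k
--         w = n >> d                        # leaves covered by a depth-d node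
--         start = (k + 1 - (1 << d)) * w    # first leaf covered by node k
--         tree.append(_maxcount(arr[start:start + w]))
--     return tree
-- ===== Notes on version B (the rewrite author's own statement) =====
-- stated objective: alternative
-- what changed: A builds the tree bottom-up with a reverse loop combining children into parents in a flat 2n-1 array; B computes each heap node independently and directly, deriving its leaf interval from the node's index (depth via bit_length) and taking max and count of that slice of the padded array, with no combine step and no dependence between nodes.
import Mathlib
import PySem

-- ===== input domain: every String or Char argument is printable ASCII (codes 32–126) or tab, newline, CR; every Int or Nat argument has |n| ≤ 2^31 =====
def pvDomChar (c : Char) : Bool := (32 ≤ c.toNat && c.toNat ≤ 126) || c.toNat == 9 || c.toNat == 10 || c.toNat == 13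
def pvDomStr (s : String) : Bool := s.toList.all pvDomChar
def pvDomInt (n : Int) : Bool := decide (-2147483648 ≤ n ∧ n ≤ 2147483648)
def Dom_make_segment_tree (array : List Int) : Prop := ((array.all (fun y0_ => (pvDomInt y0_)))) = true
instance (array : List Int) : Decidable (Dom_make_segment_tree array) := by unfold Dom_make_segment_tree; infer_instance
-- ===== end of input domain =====

-- B replaces A's bottom-up combine loop by a direct per-node computation: each heap
-- node's leaf interval is derived from its index and its (max, count) is taken straight
-- from that slice of the padded array; objective: alternative algorithm, same output.

-- ===== PORT A =====
-- n = 1; while n < len(array): n *= 2   (state n encoded as m+1 so the doubling terminates;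
-- Source B starts with the identical loop, so both ports share this helper)
def pvPow2 (m len : Nat) : Nat :=
  if m + 1 < len then pvPow2 (2 * m + 1) len else m + 1
termination_by len - (m + 1)
decreasing_by omega

def make_segment_tree (array : List Int) : List (Int × Int) :=
  let n := pvPow2 0 array.length
  let arr := array ++ List.replicate (n - array.length) (-1 : Int)
  let t0 : List (Int × Int) := List.replicate (2 * n - 1) (-1, 0)
  -- for j in range(n): segment_tree[n-1+j] = (array[j], 1)   (j < arr.length = n, so getD is exact)
  let t1 := (List.range n).foldl (fun t j => t.set (n - 1 + j) (arr.getD j (-1), 1)) t0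
  -- for k in range(n-2, -1, -1): … — since n ≥ 1 this is [n-2, …, 0], ported as (range (n-1)).reverse;
  -- all indices read/written are in range, so getD/set are exact
  ((List.range (n - 1)).reverse).foldl
    (fun t k =>
      let l := t.getD (2 * k + 1) (-1, 0)
      let r := t.getD (2 * k + 2) (-1, 0)
      if l.1 = r.1 then t.set k (l.1, l.2 + r.2)
      else if l.1 > r.1 then t.set k (l.1, l.2)
      else t.set k (r.1, r.2)) t1

-- ===== PORT B =====
-- _maxcount(seg): m = max(seg); return (m, seg.count(m))   (seg is always nonempty here,
-- so max()'s ValueError never fires and the Option default is never used)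
def pvMaxCount (seg : List Int) : Int × Int :=
  let m := (PySem.List.max? seg (fun y => y)).getD (-1)
  (m, (PySem.List.count seg m : Int))

def make_segment_tree_alt (array : List Int) : List (Int × Int) :=
  let n := pvPow2 0 array.length
  let arr := array ++ List.replicate (n - array.length) (-1 : Int)
  (List.range (2 * n - 1)).map (fun k =>
    let d := Nat.log2 (k + 1)          -- (k+1).bit_length() - 1; exact since k+1 ≥ 1
    let w := n >>> d
    let start := (k + 1 - (1 <<< d)) * w
    pvMaxCount (PySem.List.slice arr (some (start : Int)) (some ((start : Int) + (w : Int)))))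

-- ===== PRECONDITION & SPEC =====
def Spec_make_segment_tree (array : List Int) (out : List (Int × Int)) : Prop := out = make_segment_tree_alt array
instance (array : List Int) (out : List (Int × Int)) : Decidable (Spec_make_segment_tree array out) := by unfold Spec_make_segment_tree; infer_instance

-- ===== CLAIM (what is proved, stated in full; the proofs are below) =====
def Claim_equal_make_segment_tree : Prop := ∀ (array : List Int), Dom_make_segment_tree array → Spec_make_segment_tree array (make_segment_tree array)

-- ===== LEMMAS AND PROOFS =====

-- proof-side description of A's bottom-up construction: levels of pairwise combines
def pvCombine (l r : Int × Int) : Int × Int :=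
  if l.1 = r.1 then (l.1, l.2 + r.2) else if l.1 > r.1 then l else r

def pvParents (level : List (Int × Int)) : List (Int × Int) :=
  (List.range (level.length / 2)).map
    (fun i => pvCombine (level.getD (2 * i) (-1, 0)) (level.getD (2 * i + 1) (-1, 0)))

def pvLevels (level : List (Int × Int)) : List (List (Int × Int)) :=
  if level.length > 1 then level :: pvLevels (pvParents level) else [level]
termination_by level.length
decreasing_by simp only [pvParents, List.length_map, List.length_range]; omega

-- proof-side description of B's per-node value: the i-th width-w block of arr
def blk (arr : List Int) (w i : Nat) : List Int := (arr.drop (i * w)).take w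

def blocks (arr : List Int) (s : Nat) : List (Int × Int) :=
  (List.range (arr.length / 2 ^ s)).map (fun i => pvMaxCount (blk arr (2 ^ s) i))

lemma pvPow2_ge (m len : Nat) : len ≤ pvPow2 m len := by
  unfold pvPow2
  split
  · exact pvPow2_ge (2 * m + 1) len
  · omega
termination_by len - (m + 1)
decreasing_by omega

lemma pvPow2_pow (m len : Nat) : ∃ h, pvPow2 m len = (m + 1) * 2 ^ h := by
  unfold pvPow2
  split
  · obtain ⟨h, hh⟩ := pvPow2_pow (2 * m + 1) len
    exact ⟨h + 1, by rw [hh]; ring⟩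
  · exact ⟨0, by ring⟩
termination_by len - (m + 1)
decreasing_by omega

lemma length_pvParents (l : List (Int × Int)) : (pvParents l).length = l.length / 2 := by
  simp [pvParents]

lemma pvParents_getD (l : List (Int × Int)) (i : Nat) (d : Int × Int) (h : i < l.length / 2) :
    (pvParents l).getD i d = pvCombine (l.getD (2 * i) (-1, 0)) (l.getD (2 * i + 1) (-1, 0)) := by
  rw [List.getD_eq_getElem _ _ (by simpa [length_pvParents] using h)]
  simp [pvParents]

-- the combine step of A's second loop, as a named function
def stepA (t : List (Int × Int)) (k : Nat) : List (Int × Int) :=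
  t.set k (pvCombine (t.getD (2 * k + 1) (-1, 0)) (t.getD (2 * k + 2) (-1, 0)))

lemma stepA_eq :
    (fun (t : List (Int × Int)) (k : Nat) =>
      let l := t.getD (2 * k + 1) (-1, 0)
      let r := t.getD (2 * k + 2) (-1, 0)
      if l.1 = r.1 then t.set k (l.1, l.2 + r.2)
      else if l.1 > r.1 then t.set k (l.1, l.2)
      else t.set k (r.1, r.2)) = stepA := by
  funext t k
  simp only [stepA, pvCombine]
  split_ifs <;> rfl

lemma getD_set_ne {α} (t : List α) (k i : Nat) (v d : α) (h : i ≠ k) :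
    (t.set k v).getD i d = t.getD i d := by
  simp [List.getD, List.getElem?_set_ne (Ne.symm h)]

lemma getD_set_self {α} (t : List α) (k : Nat) (v d : α) (h : k < t.length) :
    (t.set k v).getD k d = v := by
  simp [List.getD, h]

lemma length_loopA (ks : List Nat) : ∀ t, (ks.foldl stepA t).length = t.length := by
  induction ks with
  | nil => intro t; rfl
  | cons k ks ih => intro t; simp only [List.foldl_cons, ih, stepA, List.length_set]

lemma loopA_getD_not_mem (ks : List Nat) : ∀ t i d, i ∉ ks →
    (ks.foldl stepA t).getD i d = t.getD i d := by
  induction ks with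
  | nil => intro t i d _; rfl
  | cons k ks ih =>
      intro t i d hi
      simp only [List.mem_cons, not_or] at hi
      simp only [List.foldl_cons, ih _ _ _ hi.2, stepA, getD_set_ne _ _ _ _ _ hi.1]

lemma loopA_getD_mem (ks : List Nat) : ∀ t i d, ks.Nodup → i ∈ ks → i < t.length →
    (∀ k ∈ ks, 2 * k + 1 ∉ ks ∧ 2 * k + 2 ∉ ks) →
    (ks.foldl stepA t).getD i d =
      pvCombine (t.getD (2 * i + 1) (-1, 0)) (t.getD (2 * i + 2) (-1, 0)) := by
  induction ks with
  | nil => intro t i d _ hi; cases hi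
  | cons k ks ih =>
      intro t i d hnd hi hlen hread
      have hnd' := List.nodup_cons.mp hnd
      rcases List.mem_cons.mp hi with rfl | hi'
      · simp only [List.foldl_cons]
        rw [loopA_getD_not_mem ks _ _ _ hnd'.1]
        exact getD_set_self _ _ _ _ hlen
      · have hik : i ≠ k := by rintro rfl; exact hnd'.1 hi'
        simp only [List.foldl_cons]
        have h1 : 2 * i + 1 ≠ k := by
          intro hk; exact ((hread i hi).1) (hk ▸ List.mem_cons_self)
        have h2 : 2 * i + 2 ≠ k := by
          intro hk; exact ((hread i hi).2) (hk ▸ List.mem_cons_self)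
        rw [ih _ _ _ hnd'.2 hi' (by simpa [stepA] using hlen)
            (fun k' hk' => ⟨fun hc => ((hread k' (List.mem_cons_of_mem _ hk')).1) (List.mem_cons_of_mem _ hc),
                            fun hc => ((hread k' (List.mem_cons_of_mem _ hk')).2) (List.mem_cons_of_mem _ hc)⟩),
           stepA, getD_set_ne _ _ _ _ _ h1, getD_set_ne _ _ _ _ _ h2]

-- first loop of A: state-independent writes at distinct indices
lemma loopW_getD_not_hit (n : Nat) (arr : List Int) (js : List Nat) :
    ∀ (t : List (Int × Int)) (i : Nat) (d : Int × Int), (∀ j ∈ js, n - 1 + j ≠ i) →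
    ((js.foldl (fun t j => t.set (n - 1 + j) (arr.getD j (-1), 1)) t)).getD i d = t.getD i d := by
  induction js with
  | nil => intro t i d _; rfl
  | cons j js ih =>
      intro t i d h
      simp only [List.foldl_cons]
      rw [ih _ _ _ (fun j' hj' => h j' (List.mem_cons_of_mem _ hj')),
          getD_set_ne _ _ _ _ _ (fun he => h j List.mem_cons_self he.symm)]

lemma length_loopW (n : Nat) (arr : List Int) (js : List Nat) : ∀ (t : List (Int × Int)),
    ((js.foldl (fun t j => t.set (n - 1 + j) (arr.getD j (-1), 1)) t)).length = t.length := by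
  induction js with
  | nil => intro t; rfl
  | cons j js ih => intro t; simp only [List.foldl_cons, ih, List.length_set]

lemma loopW_getD_hit (n : Nat) (arr : List Int) (js : List Nat) :
    ∀ (t : List (Int × Int)) (j : Nat) (d : Int × Int), js.Nodup → j ∈ js →
    n - 1 + j < t.length →
    ((js.foldl (fun t j => t.set (n - 1 + j) (arr.getD j (-1), 1)) t)).getD (n - 1 + j) d
      = (arr.getD j (-1), 1) := by
  induction js with
  | nil => intro t j d _ hj; cases hj
  | cons j0 js ih =>
      intro t j d hnd hj hlen
      have hnd' := List.nodup_cons.mp hnd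
      rcases List.mem_cons.mp hj with rfl | hj'
      · simp only [List.foldl_cons]
        rw [loopW_getD_not_hit n arr js _ _ _ (by
              intro j' hj' he
              have hjj : j' = j := by omega
              subst hjj
              exact hnd'.1 hj')]
        exact getD_set_self _ _ _ _ hlen
      · simp only [List.foldl_cons]
        exact ih _ _ _ hnd'.2 hj' (by simpa using hlen)

lemma ext_getD {α} (d : α) (l1 l2 : List α) (hlen : l1.length = l2.length)
    (h : ∀ i, i < l1.length → l1.getD i d = l2.getD i d) : l1 = l2 := by
  apply List.ext_getElem hlen
  intro i h1 h2
  have := h i h1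
  rwa [List.getD_eq_getElem _ _ h1, List.getD_eq_getElem _ _ h2] at this

-- the loop confined to a prefix passes the suffix through
lemma loopA_prefix (ks : List Nat) : ∀ (P suf : List (Int × Int)),
    (∀ k ∈ ks, 2 * k + 2 < P.length) →
    ks.foldl stepA (P ++ suf) = (ks.foldl stepA P) ++ suf := by
  induction ks with
  | nil => intro P suf _; rfl
  | cons k ks ih =>
      intro P suf h
      have hk := h k List.mem_cons_self
      have hstep : stepA (P ++ suf) k = stepA P k ++ suf := by
        simp only [stepA]
        rw [List.getD_append _ _ _ _ (by omega), List.getD_append _ _ _ _ (by omega),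
            List.set_append_left _ _ (by omega)]
      simp only [List.foldl_cons, hstep]
      exact ih _ _ (fun k' hk' => by
        simpa [stepA] using h k' (List.mem_cons_of_mem _ hk'))

-- after A's first loop the tree is junk-prefix ++ decorated leaves
lemma t1_eq (n : Nat) (arr : List Int) (hn : arr.length = n) (hpos : 1 ≤ n) :
    (List.range n).foldl (fun t j => t.set (n - 1 + j) (arr.getD j (-1), 1))
      (List.replicate (2 * n - 1) ((-1 : Int), (0 : Int)))
      = List.replicate (n - 1) ((-1 : Int), (0 : Int)) ++ arr.map (fun x => (x, 1)) := by
  apply ext_getD ((-1 : Int), (0 : Int))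
  · rw [length_loopW]; simp [hn]; omega
  · intro i hi
    rw [length_loopW, List.length_replicate] at hi
    by_cases hcase : i < n - 1
    · rw [loopW_getD_not_hit n arr _ _ _ _ (fun j hj => by omega),
          List.getD_append _ _ _ _ (by simpa using hcase)]
      rw [List.getD_eq_getElem _ _ (by simpa using (by omega : i < 2 * n - 1)),
          List.getD_eq_getElem _ _ (by simpa using hcase)]
      simp
    · have hj : i = n - 1 + (i - (n - 1)) := by omega
      have hjn : i - (n - 1) < n := by omega
      rw [hj, loopW_getD_hit n arr _ _ _ _ (List.nodup_range) (List.mem_range.mpr hjn)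
            (by simp only [List.length_replicate]; omega)]
      rw [List.getD_append_right _ _ _ _ (by simp only [List.length_replicate]; omega)]
      simp only [List.length_replicate]
      have hidx : n - 1 + (i - (n - 1)) - (n - 1) = i - (n - 1) := by omega
      rw [hidx, List.getD_eq_getElem _ _ (by omega),
          List.getD_eq_getElem _ _ (by simp only [List.length_map]; omega), List.getElem_map]

-- A's downward combine loop over pre ++ leaves produces the level stack, flattened top-down
lemma main_lemma : ∀ (h : Nat) (pre leaves : List (Int × Int)),
    leaves.length = 2 ^ h → pre.length = 2 ^ h - 1 →
    ((List.range (2 ^ h - 1)).reverse).foldl stepA (pre ++ leaves)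
      = ((pvLevels leaves).reverse).flatten := by
  intro h
  induction h with
  | zero =>
      intro pre leaves hl hp
      have : pre = [] := List.length_eq_zero_iff.mp (by simpa using hp)
      subst this
      rw [pvLevels]
      simp [hl]
  | succ h ih =>
      intro pre leaves hl hp
      set H := 2 ^ h with hH
      have hN : 2 ^ (h + 1) = 2 * H := by rw [hH]; ring
      have hH1 : 1 ≤ H := Nat.one_le_two_pow
      have hsplit : (List.range (2 ^ (h + 1) - 1)).reverse
          = ((List.range H).map (fun x => H - 1 + x)).reverse ++ (List.range (H - 1)).reverse := by
        rw [← List.reverse_append]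
        congr 1
        have : 2 ^ (h + 1) - 1 = (H - 1) + H := by omega
        rw [this, List.range_add]
      rw [hsplit, List.foldl_append]
      set ks1 := ((List.range H).map (fun x => H - 1 + x)).reverse with hks1
      have hmem1 : ∀ i, i ∈ ks1 ↔ H - 1 ≤ i ∧ i < 2 * H - 1 := by
        intro i
        simp only [hks1, List.mem_reverse, List.mem_map, List.mem_range]
        constructor
        · rintro ⟨x, hx, rfl⟩; omega
        · rintro ⟨h1, h2⟩; exact ⟨i - (H - 1), by omega, by omega⟩
      have hnd1 : ks1.Nodup := by
        rw [hks1, List.nodup_reverse]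
        exact List.Nodup.map (fun a b hab => by omega) List.nodup_range
      have hlen2 : leaves.length / 2 = H := by rw [hl, hN]; omega
      have hparents : pvParents leaves = (List.range H).map
          (fun i => pvCombine (leaves.getD (2 * i) (-1, 0)) (leaves.getD (2 * i + 1) (-1, 0))) := by
        rw [pvParents, hlen2]
      have hPlen : (pvParents leaves).length = H := by rw [hparents]; simp
      have phase1 : ks1.foldl stepA (pre ++ leaves)
          = (pre.take (H - 1) ++ pvParents leaves) ++ leaves := by
        apply ext_getD ((-1 : Int), (0 : Int))
        · rw [length_loopA]
          simp [hl, hp, hPlen, hN]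
          omega
        · intro i hi
          rw [length_loopA, List.length_append, hl, hp] at hi
          have hread : ∀ k ∈ ks1, 2 * k + 1 ∉ ks1 ∧ 2 * k + 2 ∉ ks1 := by
            intro k hk
            rw [hmem1] at hk
            constructor <;> (rw [hmem1]; omega)
          by_cases hc1 : i < H - 1
          · rw [loopA_getD_not_mem _ _ _ _ (by rw [hmem1]; omega)]
            rw [List.getD_append _ _ _ _ (by omega), List.getD_append _ _ _ _ (by simp; omega),
                List.getD_append _ _ _ _ (by simp [hp]; omega)]
            rw [List.getD_eq_getElem _ _ (by omega), List.getD_eq_getElem _ _ (by simp [hp]; omega)]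
            simp
          · by_cases hc2 : i < 2 * H - 1
            · set j := i - (H - 1) with hj
              have hjH : j < H := by omega
              rw [loopA_getD_mem _ _ _ _ hnd1 ((hmem1 i).mpr ⟨by omega, hc2⟩)
                  (by simp [hp, hl]; omega) hread]
              have hri1 : 2 * i + 1 - pre.length = 2 * j := by rw [hp]; omega
              have hri2 : 2 * i + 2 - pre.length = 2 * j + 1 := by rw [hp]; omega
              rw [List.getD_append_right _ _ _ _ (by rw [hp]; omega),
                  List.getD_append_right _ _ _ _ (by rw [hp]; omega), hri1, hri2]
              rw [List.getD_append _ _ _ _ (by simp [hPlen]; omega),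
                  List.getD_append_right _ _ _ _ (by simp; omega)]
              have : i - (pre.take (H - 1)).length = j := by simp [hp]; omega
              rw [this, pvParents_getD _ _ _ (by rw [hl, hN]; omega)]
            · rw [loopA_getD_not_mem _ _ _ _ (by rw [hmem1]; omega)]
              rw [List.getD_append_right _ _ _ _ (by rw [hp]; omega),
                  List.getD_append_right _ _ _ _ (by simp [hp, hPlen]; omega)]
              congr 1
              simp [hp, hPlen]
              omega
      rw [phase1]
      have hconf : ∀ k ∈ (List.range (H - 1)).reverse,
          2 * k + 2 < (pre.take (H - 1) ++ pvParents leaves).length := by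
        intro k hk
        simp only [List.mem_reverse, List.mem_range] at hk
        simp [hp, hPlen]
        omega
      rw [loopA_prefix _ _ _ hconf]
      rw [ih (pre.take (H - 1)) (pvParents leaves) hPlen (by simp [hp]; omega)]
      have : pvLevels leaves = leaves :: pvLevels (pvParents leaves) := by
        rw [pvLevels]
        simp only [hl, hN]
        rw [if_pos (by omega)]
      rw [this]
      simp only [List.reverse_cons, List.flatten_append, List.flatten_cons, List.flatten_nil,
        List.append_nil]

-- ===== B-side characterisation: per-node max/count =====

lemma mc_singleton (x : Int) : pvMaxCount [x] = (x, 1) := by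
  simp [pvMaxCount, PySem.List.max?_id_cons, PySem.List.count_eq]

lemma mc_combine (s t : List Int) (hs : s ≠ []) (ht : t ≠ []) :
    pvMaxCount (s ++ t) = pvCombine (pvMaxCount s) (pvMaxCount t) := by
  obtain ⟨ms, hms⟩ : ∃ m, PySem.List.max? s (fun y => y) = some m := by
    cases h : PySem.List.max? s (fun y => y) with
    | none => exact absurd ((PySem.List.max?_eq_none_iff _ _).mp h) hs
    | some m => exact ⟨m, rfl⟩
  obtain ⟨mt, hmt⟩ : ∃ m, PySem.List.max? t (fun y => y) = some m := by
    cases h : PySem.List.max? t (fun y => y) with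
    | none => exact absurd ((PySem.List.max?_eq_none_iff _ _).mp h) ht
    | some m => exact ⟨m, rfl⟩
  obtain ⟨v, hv⟩ : ∃ m, PySem.List.max? (s ++ t) (fun y => y) = some m := by
    cases h : PySem.List.max? (s ++ t) (fun y => y) with
    | none =>
        have := (PySem.List.max?_eq_none_iff _ _).mp h
        simp [hs] at this
    | some m => exact ⟨m, rfl⟩
  have hsub : ∀ y ∈ s, y ≤ ms := fun y hy => PySem.List.max?_isMax hms y hy
  have htub : ∀ y ∈ t, y ≤ mt := fun y hy => PySem.List.max?_isMax hmt y hy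
  have hveq : v = max ms mt := by
    apply le_antisymm
    · rcases List.mem_append.mp (PySem.List.max?_mem hv) with h | h
      · exact le_trans (hsub v h) (le_max_left _ _)
      · exact le_trans (htub v h) (le_max_right _ _)
    · apply max_le
      · exact PySem.List.max?_isMax hv ms (List.mem_append.mpr (Or.inl (PySem.List.max?_mem hms)))
      · exact PySem.List.max?_isMax hv mt (List.mem_append.mpr (Or.inr (PySem.List.max?_mem hmt)))
  simp only [pvMaxCount, pvCombine, hms, hmt, hv, Option.getD_some, PySem.List.count_eq,
    List.count_append]
  rcases lt_trichotomy ms mt with hlt | heq | hgt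
  · have hvm : v = mt := by rw [hveq, max_eq_right hlt.le]
    have hzero : List.count mt s = 0 := by
      rw [List.count_eq_zero]
      intro hmem
      exact absurd (hsub mt hmem) (not_le.mpr hlt)
    rw [if_neg (by simpa using hlt.ne), if_neg (by simpa using not_lt.mpr hlt.le)]
    simp [hvm, hzero]
  · subst heq
    have hvm : v = ms := by rw [hveq, max_self]
    rw [if_pos rfl]
    simp [hvm]
  · have hvm : v = ms := by rw [hveq, max_eq_left hgt.le]
    have hzero : List.count ms t = 0 := by
      rw [List.count_eq_zero]
      intro hmem
      exact absurd (htub ms hmem) (not_le.mpr hgt)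
    rw [if_neg (by simpa using hgt.ne'), if_pos (by simpa using hgt)]
    simp [hvm, hzero]

lemma blk_append (arr : List Int) (w i : Nat) :
    blk arr w (2 * i) ++ blk arr w (2 * i + 1) = blk arr (2 * w) i := by
  simp only [blk]
  have h1 : i * (2 * w) = 2 * i * w := by ring
  have h2 : 2 * w = w + w := by ring
  have h3 : (2 * i + 1) * w = 2 * i * w + w := by ring
  rw [h1, h2, h3, List.take_add, List.drop_drop]

lemma blk_ne_nil (arr : List Int) (w i : Nat) (hw : 0 < w) (h : (i + 1) * w ≤ arr.length) :
    blk arr w i ≠ [] := by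
  rw [add_mul, one_mul] at h
  have : (blk arr w i).length = w := by
    simp only [blk, List.length_take, List.length_drop]
    omega
  intro hnil
  rw [hnil] at this
  simp at this
  omega

lemma blocks_length (arr : List Int) (s : Nat) : (blocks arr s).length = arr.length / 2 ^ s := by
  simp [blocks]

lemma blocks_getD (arr : List Int) (s i : Nat) (d : Int × Int) (h : i < arr.length / 2 ^ s) :
    (blocks arr s).getD i d = pvMaxCount (blk arr (2 ^ s) i) := by
  rw [List.getD_eq_getElem _ _ (by simpa [blocks_length] using h)]
  simp [blocks]

lemma parents_blocks (arr : List Int) (m s : Nat) (hlen : arr.length = 2 ^ m) (hs : s + 1 ≤ m) :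
    pvParents (blocks arr s) = blocks arr (s + 1) := by
  have hdiv : arr.length / 2 ^ s = 2 ^ (m - s) := by
    rw [hlen, Nat.pow_div (by omega) (by norm_num)]
  have hdiv1 : arr.length / 2 ^ (s + 1) = 2 ^ (m - s - 1) := by
    rw [hlen, Nat.pow_div (by omega) (by norm_num)]
    congr 1
  have hpow2 : (2 : Nat) ^ (m - s) = 2 * 2 ^ (m - s - 1) := by
    rw [← pow_succ']
    congr 1
    omega
  have hhalf : (blocks arr s).length / 2 = arr.length / 2 ^ (s + 1) := by
    rw [blocks_length, hdiv, hdiv1]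
    omega
  have hbound : ∀ j, j < 2 ^ (m - s) → (j + 1) * 2 ^ s ≤ arr.length := by
    intro j hj
    have h1 : (j + 1) * 2 ^ s ≤ 2 ^ (m - s) * 2 ^ s := Nat.mul_le_mul_right _ (by omega)
    rw [← pow_add] at h1
    rw [hlen]
    calc (j + 1) * 2 ^ s ≤ 2 ^ (m - s + s) := h1
      _ = 2 ^ m := by congr 1; omega
  apply ext_getD ((-1 : Int), (0 : Int))
  · rw [length_pvParents, hhalf, blocks_length]
  · intro i hi
    rw [length_pvParents, hhalf, hdiv1] at hi
    have hi2 : 2 * i + 1 < arr.length / 2 ^ s := by rw [hdiv]; omega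
    rw [pvParents_getD _ _ _ (by rw [hhalf, hdiv1]; exact hi),
        blocks_getD _ _ _ _ (by omega), blocks_getD _ _ _ _ hi2,
        blocks_getD _ _ _ _ (by rw [hdiv1]; exact hi)]
    rw [← mc_combine _ _
        (blk_ne_nil _ _ _ (Nat.two_pow_pos _) (hbound _ (by rw [← hdiv]; omega)))
        (blk_ne_nil _ _ _ (Nat.two_pow_pos _) (hbound _ (by rw [← hdiv]; omega))),
      blk_append]
    congr 2
    rw [pow_succ']

lemma levels_blocks : ∀ (h : Nat) (s : Nat) (arr : List Int), arr.length = 2 ^ (h + s) →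
    pvLevels (blocks arr s) = (List.range (h + 1)).map (fun e => blocks arr (e + s)) := by
  intro h
  induction h with
  | zero =>
      intro s arr hlen
      rw [pvLevels, if_neg (by rw [blocks_length, hlen]; simp)]
      simp
  | succ h ih =>
      intro s arr hlen
      have hblen : (blocks arr s).length = 2 ^ (h + 1) := by
        rw [blocks_length, hlen, Nat.pow_div (by omega) (by norm_num)]
        congr 1
        omega
      rw [pvLevels, if_pos (by rw [hblen]; exact Nat.one_lt_two_pow (by omega)),
          parents_blocks arr (h + 1 + s) s hlen (by omega),
          ih (s + 1) arr (by rw [hlen]; congr 1; omega)]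
      conv_rhs => rw [List.range_succ_eq_map, List.map_cons, List.map_map]
      congr 1
      · congr 1
        omega
      · apply List.map_congr_left
        intro e _
        simp only [Function.comp_apply]
        congr 1
        omega

lemma log2_eq_of (j d : Nat) (h1 : 2 ^ d ≤ j) (h2 : j < 2 ^ (d + 1)) : Nat.log2 j = d := by
  have hpos : 0 < 2 ^ d := Nat.two_pow_pos _
  have hj : j ≠ 0 := by omega
  have ha : Nat.log2 j < d + 1 := (Nat.log2_lt hj).mpr h2
  have hb : ¬ Nat.log2 j < d := by
    intro hc
    exact absurd ((Nat.log2_lt hj).mp hc) (not_lt.mpr h1)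
  omega

lemma blocks_zero (arr : List Int) : arr.map (fun x => (x, (1 : Int))) = blocks arr 0 := by
  apply List.ext_getElem
  · simp [blocks_length]
  · intro i h1 h2
    simp only [List.getElem_map]
    rw [List.length_map] at h1
    simp only [blocks, pow_zero, Nat.div_one, List.getElem_map, List.getElem_range]
    have hblk : blk arr 1 i = [arr[i]] := by
      simp only [blk, Nat.mul_one]
      rw [List.drop_eq_getElem_cons h1]
      rfl
    rw [hblk, mc_singleton]

-- flatten of the top-down level stack = B's closed per-node form
lemma flat_blocks : ∀ (h : Nat) (s : Nat) (arr : List Int), arr.length = 2 ^ (h + s) →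
    (((List.range (h + 1)).map (fun e => blocks arr (e + s))).reverse).flatten
      = (List.range (2 ^ (h + 1) - 1)).map (fun k =>
          pvMaxCount (blk arr (2 ^ (h - Nat.log2 (k + 1) + s)) (k + 1 - 2 ^ Nat.log2 (k + 1)))) := by
  intro h
  induction h with
  | zero =>
      intro s arr hlen
      simp only [Nat.zero_add] at hlen ⊢
      rw [show (2 : Nat) ^ 1 - 1 = 1 by norm_num]
      simp only [List.range_one, List.map_cons, List.map_nil, List.reverse_cons,
        List.reverse_nil, List.nil_append, List.flatten_cons, List.flatten_nil, List.append_nil,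
        Nat.zero_add]
      rw [blocks, hlen, Nat.div_self (Nat.two_pow_pos s),
          log2_eq_of 1 0 (by norm_num) (by norm_num)]
      norm_num
  | succ h ih =>
      intro s arr hlen
      -- peel the finest level (e = 0) off the bottom of the reversed stack
      rw [List.range_succ_eq_map, List.map_cons, List.reverse_cons', List.concat_eq_append,
          List.flatten_append, List.map_map]
      simp only [List.flatten_cons, List.flatten_nil, List.append_nil, Nat.zero_add]
      have htail : (List.range (h + 1)).map ((fun e => blocks arr (e + s)) ∘ Nat.succ)
          = (List.range (h + 1)).map (fun e => blocks arr (e + (s + 1))) := by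
        apply List.map_congr_left
        intro e _
        simp only [Function.comp_apply]
        congr 1
        omega
      rw [htail, ih (s + 1) arr (by rw [hlen]; congr 1; omega)]
      -- split the node range into internal nodes and leaves
      have hsplitn : 2 ^ (h + 1 + 1) - 1 = (2 ^ (h + 1) - 1) + 2 ^ (h + 1) := by
        have : 2 ^ (h + 1 + 1) = 2 * 2 ^ (h + 1) := by rw [pow_succ]; ring
        omega
      rw [hsplitn, List.range_add, List.map_append]
      congr 1
      · -- internal nodes: same closed form, one level coarser base
        apply List.map_congr_left
        intro k hk
        rw [List.mem_range] at hk
        have hd : Nat.log2 (k + 1) < h + 1 := (Nat.log2_lt (by omega)).mpr (by omega)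
        rw [show h + 1 - Nat.log2 (k + 1) + s = h - Nat.log2 (k + 1) + (s + 1) from by omega]
      · -- leaves: exactly blocks arr s
        rw [blocks]
        have hcnt : arr.length / 2 ^ s = 2 ^ (h + 1) := by
          rw [hlen, Nat.pow_div (by omega) (by norm_num)]
          congr 1
          omega
        rw [hcnt, List.map_map]
        apply List.map_congr_left
        intro i hi
        rw [List.mem_range] at hi
        simp only [Function.comp_apply]
        have hb : 0 < 2 ^ (h + 1) := Nat.two_pow_pos _
        have hlog : Nat.log2 (2 ^ (h + 1) - 1 + i + 1) = h + 1 := by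
          apply log2_eq_of
          · omega
          · have : 2 ^ (h + 1 + 1) = 2 * 2 ^ (h + 1) := by rw [pow_succ]; ring
            omega
        rw [hlog, show h + 1 - (h + 1) + s = s from by omega,
            show 2 ^ (h + 1) - 1 + i + 1 - 2 ^ (h + 1) = i from by omega]

-- ===== VERDICT (by name: the statement is the Claim_ definition above) =====
theorem make_segment_tree_spec : Claim_equal_make_segment_tree := by
  intro array _
  unfold Spec_make_segment_tree make_segment_tree make_segment_tree_alt
  simp only [stepA_eq]
  obtain ⟨H, hpow⟩ := pvPow2_pow 0 array.length
  have hge := pvPow2_ge 0 array.length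
  rw [show (0 + 1) * 2 ^ H = 2 ^ H by ring] at hpow
  rw [hpow] at hge ⊢
  set arr := array ++ List.replicate (2 ^ H - array.length) (-1 : Int) with harr
  have harrlen : arr.length = 2 ^ H := by
    simp [harr]
    omega
  rw [t1_eq (2 ^ H) arr harrlen Nat.one_le_two_pow,
      main_lemma H _ _ (by rw [List.length_map, harrlen]) (by simp),
      blocks_zero, levels_blocks H 0 arr (by simpa using harrlen),
      flat_blocks H 0 arr (by simpa using harrlen)]
  have hsz : 2 * 2 ^ H - 1 = 2 ^ (H + 1) - 1 := by
    have : 2 ^ (H + 1) = 2 * 2 ^ H := by rw [pow_succ]; ring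
    omega
  rw [hsz]
  apply List.map_congr_left
  intro k hk
  rw [List.mem_range] at hk
  have hd : Nat.log2 (k + 1) ≤ H := by
    have := (Nat.log2_lt (show k + 1 ≠ 0 by omega)).mpr (show k + 1 < 2 ^ (H + 1) by omega)
    omega
  set d := Nat.log2 (k + 1) with hdd
  simp only [Nat.add_zero]
  have hshr : 2 ^ H >>> d = 2 ^ (H - d) := by
    rw [Nat.shiftRight_eq_div_pow, Nat.pow_div hd (by norm_num)]
  have hshl : 1 <<< d = 2 ^ d := by
    rw [Nat.shiftLeft_eq, one_mul]
  rw [hshr, hshl]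
  have hslice : PySem.List.slice arr
      (some (((k + 1 - 2 ^ d) * 2 ^ (H - d) : Nat) : Int))
      (some ((((k + 1 - 2 ^ d) * 2 ^ (H - d) : Nat) : Int) + ((2 ^ (H - d) : Nat) : Int)))
      = blk arr (2 ^ (H - d)) (k + 1 - 2 ^ d) :=
    PySem.List.slice_natCast_add arr _ _
  rw [hslice]
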